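-- pv_equiv track=rewrite | github.com/kokoko12334/TIL2 | Algorithm/python/programmers/가장 많이 받은 선물.py | solution
-- ===== SOURCE A (Python) =====
-- def solution(friends, gifts):
--
--     dic = {}
--     n = len(friends)
--     for i in range(n):
--         dic[friends[i]] = i
--
--     arr = [[0]*n for _ in range(n)]
--
--
--     for g in gifts:
--         give, rec = g.split(" ")
--
--         idx_g = dic[give]
--         idx_rec = dic[rec]
--         arr[idx_g][idx_rec] += 1
--
--     g_index = {}
--
--     for f in friends:
--         idx = dic[f]
--         give = sum(arr[idx])
--         given_arr =  [arr[i][idx] for i in range(n)]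
--         given = sum(given_arr)
--
--         score = give -given        #score가 더 큰사람이 받음
--         g_index[idx] = score
--
--     result = {k:0 for k in range(n)}
--
--     for i in range(n):
--         for j in range(i+1,n):
--
--             if arr[i][j] > arr[j][i]:
--                 result[i] += 1
--
--             elif arr[i][j] < arr[j][i]:
--                 result[j] += 1
--
--             else:
--                 if g_index[i] > g_index[j]:
--                     result[i] += 1
--
--                 elif g_index[i] < g_index[j]:
--                     result[j] += 1
--
--     answer = 0
--     for v in result.values():
--         answer = max(answer,v)
--
--
--     return answer
-- ===== SOURCE B (Python) =====
-- def solution(friends, gifts):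
--     pairs = [tuple(g.split(" ")) for g in gifts]
--     givers = [p[0] for p in pairs]
--     receivers = [p[1] for p in pairs]
--     best = 0
--     for a in friends:
--         sa = givers.count(a) - receivers.count(a)
--         wins = 0
--         for b in friends:
--             if b == a:
--                 continue
--             sb = givers.count(b) - receivers.count(b)
--             if (pairs.count((a, b)), sa) > (pairs.count((b, a)), sb):
--                 wins += 1
--         best = max(best, wins)
--     return best
-- ===== Notes on version B (the rewrite author's own statement) =====
-- stated objective: simpler
-- what changed: B discards A's name-to-index dict, n-by-n count matrix, g_index and result dicts entirely: it splits the gifts once into token pairs and then, looping over friend names directly, recounts every quantity on demand with list.count, deciding each duel by one lexicographic tuple comparison and folding wins into a running max.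
import Mathlib
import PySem

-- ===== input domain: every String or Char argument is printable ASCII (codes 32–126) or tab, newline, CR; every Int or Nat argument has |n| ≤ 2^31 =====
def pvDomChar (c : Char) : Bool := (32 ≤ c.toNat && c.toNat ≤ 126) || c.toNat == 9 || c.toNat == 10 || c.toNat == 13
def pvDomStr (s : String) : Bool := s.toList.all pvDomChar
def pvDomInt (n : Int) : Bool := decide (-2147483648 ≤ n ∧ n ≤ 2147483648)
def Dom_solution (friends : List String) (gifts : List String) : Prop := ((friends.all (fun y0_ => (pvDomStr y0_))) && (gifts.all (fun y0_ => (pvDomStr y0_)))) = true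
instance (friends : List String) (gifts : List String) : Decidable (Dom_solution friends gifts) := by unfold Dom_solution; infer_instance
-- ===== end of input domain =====

-- B replaces A's name→index dict, n×n matrix and the dicts g_index/result by direct recounting:
-- gifts are split once into token pairs, every duel is decided by list.count plus one lexicographic
-- tuple comparison (objective: simpler; B is shorter but recounts, so it is not faster).

-- g.split(" ") (separator " " is non-empty, so split? is always `some`)
def pvSplit (g : String) : List String := (PySem.Str.split? g " ").getD []

-- ===== PORT A =====
-- dic = {friends[i]: i}
def pvMkDic (friends : List String) : PySem.Dict String Int :=
  (PySem.List.enumerate friends).foldl (fun d p => d.insert p.2 p.1) PySem.Dict.empty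

def pvEntry (arr : List (List Int)) (i j : Nat) : Int := (arr.getD i []).getD j 0

def pvBump (arr : List (List Int)) (i j : Nat) : List (List Int) :=
  arr.modify i (fun row => row.modify j (· + 1))

-- arr after the gifts loop (a gift that does not split into two tokens raises in Python: outside Pre_)
def pvArr (dic : PySem.Dict String Int) (n : Nat) (gifts : List String) : List (List Int) :=
  gifts.foldl (fun arr g =>
    match pvSplit g with
    | [give, rec] => pvBump arr ((dic.getD give 0).toNat) ((dic.getD rec 0).toNat)
    | _ => arr) (List.replicate n (List.replicate n 0))

-- g_index = {idx: give - given}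
def pvGIndex (dic : PySem.Dict String Int) (arr : List (List Int)) (n : Nat)
    (friends : List String) : PySem.Dict Int Int :=
  friends.foldl (fun gi f =>
    let idx := (dic.getD f 0).toNat
    let give := (arr.getD idx []).sum
    let given := ((List.range n).map (fun i => pvEntry arr i idx)).sum
    gi.insert (idx : Int) (give - given)) PySem.Dict.empty

-- result = {k: 0}, then the triangular double loop
def pvResult (arr : List (List Int)) (gIndex : PySem.Dict Int Int) (n : Nat) :
    PySem.Dict Int Int :=
  (List.range n).foldl (fun r i =>
    (List.range' (i+1) (n - (i+1))).foldl (fun r j =>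
      if pvEntry arr i j > pvEntry arr j i then r.modify (i : Int) 0 (· + 1)
      else if pvEntry arr i j < pvEntry arr j i then r.modify (j : Int) 0 (· + 1)
      else if gIndex.getD (i : Int) 0 > gIndex.getD (j : Int) 0 then r.modify (i : Int) 0 (· + 1)
      else if gIndex.getD (i : Int) 0 < gIndex.getD (j : Int) 0 then r.modify (j : Int) 0 (· + 1)
      else r) r)
    ((List.range n).foldl (fun r (k : Nat) => r.insert (k : Int) 0) PySem.Dict.empty)

def solution (friends : List String) (gifts : List String) : Int :=
  let dic := pvMkDic friends
  let n := friends.length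
  let arr := pvArr dic n gifts
  let gIndex := pvGIndex dic arr n friends
  let result := pvResult arr gIndex n
  result.values.foldl (fun answer v => max answer v) 0

-- ===== PORT B =====
-- tuple(g.split(" ")); exact when the gift has two tokens (the only case inside Pre_,
-- where Python's tuple is a pair — other arities do not fit the pair type)
def pvTok (g : String) : String × String :=
  match pvSplit g with
  | [a, b] => (a, b)
  | _ => ("", "")

-- inner loop of B: wins of name a against every other name, by direct recounting
def pvWinsB (pairs : List (String × String)) (givers receivers : List String)
    (friends : List String) (a : String) (sa : Int) : Int :=
  friends.foldl (fun wins b =>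
    if b == a then wins
    else
      -- Python tuple comparison (pairs.count((a,b)), sa) > (pairs.count((b,a)), sb): lexicographic
      if (pairs.count (a, b) : Int) > (pairs.count (b, a) : Int) ∨
         ((pairs.count (a, b) : Int) = (pairs.count (b, a) : Int) ∧
          sa > (givers.count b : Int) - (receivers.count b : Int))
      then wins + 1 else wins) 0

def solution_alt (friends : List String) (gifts : List String) : Int :=
  let pairs := gifts.map pvTok
  let givers := pairs.map Prod.fst
  let receivers := pairs.map Prod.snd
  friends.foldl (fun best a =>
    max best (pvWinsB pairs givers receivers friends a
      ((givers.count a : Int) - (receivers.count a : Int)))) 0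

-- ===== PRECONDITION & SPEC =====
-- Pre_ excludes exactly the inputs on which A raises: duplicate friend names (KeyError on a
-- missing g_index key), a gift that does not split on " " into exactly two tokens (ValueError),
-- and a gift naming someone not in friends (KeyError).
def Pre_solution (friends : List String) (gifts : List String) : Prop :=
  friends.Nodup ∧ ∀ g ∈ gifts, (pvSplit g).length = 2 ∧ ∀ t ∈ pvSplit g, t ∈ friends
instance (friends : List String) (gifts : List String) : Decidable (Pre_solution friends gifts) := by
  unfold Pre_solution; infer_instance

def pvWitness_solution : List String × List String := (["a", "b"], ["a b", "b a", "a b"])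

def Spec_solution (friends : List String) (gifts : List String) (out : Int) : Prop := out = solution_alt friends gifts
instance (friends : List String) (gifts : List String) (out : Int) : Decidable (Spec_solution friends gifts out) := by unfold Spec_solution; infer_instance

-- ===== CLAIM (what is proved, stated in full; the proofs are below) =====
def Claim_equal_solution : Prop := ∀ (friends : List String) (gifts : List String), Dom_solution friends gifts → Pre_solution friends gifts → Spec_solution friends gifts (solution friends gifts)

-- ===== LEMMAS AND PROOFS =====

-- index of a friend name in the final dic
def pvIdx (friends : List String) (s : String) : Int := (pvMkDic friends).getD s 0

-- the (giver, receiver) index pair of a gift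
def pvKey2 {κ : Type} (F : String → String → κ) (g : String) : κ :=
  match pvSplit g with
  | [a, b] => F a b
  | _ => F "" ""

def pvKeyP (friends : List String) (g : String) : Int × Int :=
  pvKey2 (fun a b => (pvIdx friends a, pvIdx friends b)) g

-- pairwise / marginal counts of the gift list
def pvC (friends gifts : List String) (i j : Nat) : Int :=
  ((gifts.map (pvKeyP friends)).count ((i : Int), (j : Int)) : Int)
def pvCG (friends gifts : List String) (i : Nat) : Int :=
  ((gifts.map (pvKeyP friends)).countP (fun p => p.1 == (i : Int)) : Int)
def pvCR (friends gifts : List String) (j : Nat) : Int :=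
  ((gifts.map (pvKeyP friends)).countP (fun p => p.2 == (j : Int)) : Int)
def pvSc (friends gifts : List String) (i : Nat) : Int :=
  pvCG friends gifts i - pvCR friends gifts i

-- i beats j (an abbrev so Decidable inference sees the comparisons)
abbrev pvBeat (friends gifts : List String) (i j : Nat) : Prop :=
  pvC friends gifts i j > pvC friends gifts j i ∨
    (pvC friends gifts i j = pvC friends gifts j i ∧ pvSc friends gifts i > pvSc friends gifts j)
lemma pvBeat_irrefl (friends gifts : List String) (i : Nat) : ¬ pvBeat friends gifts i i := by
  unfold pvBeat; omega

-- ---- dic lookup ----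
lemma dic_get_aux (xs : List String) (s : Int) (d : PySem.Dict String Int) (x : String)
    (hx : x ∉ xs) :
    ((PySem.List.enumerate xs s).foldl (fun d p => d.insert p.2 p.1) d).get? x = d.get? x := by
  induction xs generalizing s d with
  | nil => simp [PySem.List.enumerate]
  | cons a t ih =>
    simp only [PySem.List.enumerate_cons, List.foldl_cons]
    rw [ih _ _ (by simp_all)]
    rw [PySem.Dict.get?_insert_of_ne]
    intro h; exact hx (h ▸ List.mem_cons_self)

lemma dic_get (xs : List String) (hnd : xs.Nodup) (s : Int) (d : PySem.Dict String Int)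
    (k : Nat) (hk : k < xs.length) :
    ((PySem.List.enumerate xs s).foldl (fun d p => d.insert p.2 p.1) d).get? xs[k] = some (s + k) := by
  induction xs generalizing s d k with
  | nil => simp at hk
  | cons a t ih =>
    simp only [PySem.List.enumerate_cons, List.foldl_cons]
    cases k with
    | zero =>
      rw [dic_get_aux _ _ _ _ (by simp_all)]
      simp [PySem.Dict.get?_insert_self]
    | succ m =>
      have := ih (List.nodup_cons.1 hnd).2 (s+1) (d.insert a s) m (by simpa using hk)
      simpa [add_comm, add_assoc, add_left_comm] using this

lemma idx_get (friends : List String) (hnd : friends.Nodup) (k : Nat) (hk : k < friends.length) :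
    pvIdx friends friends[k] = (k : Int) := by
  unfold pvIdx pvMkDic PySem.Dict.getD
  rw [dic_get friends hnd 0 PySem.Dict.empty k hk]
  simp

lemma idx_mem (friends : List String) (hnd : friends.Nodup) (s : String) (hs : s ∈ friends) :
    0 ≤ pvIdx friends s ∧ pvIdx friends s < friends.length := by
  obtain ⟨k, hk, rfl⟩ := List.mem_iff_getElem.1 hs
  rw [idx_get friends hnd k hk]
  omega

lemma idx_eq_iff (friends : List String) (hnd : friends.Nodup) (x : String) (hx : x ∈ friends)
    (k : Nat) (hk : k < friends.length) :
    pvIdx friends x = (k : Int) ↔ x = friends[k] := by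
  constructor
  · intro h
    obtain ⟨m, hm, rfl⟩ := List.mem_iff_getElem.1 hx
    rw [idx_get friends hnd m hm] at h
    have : m = k := by exact_mod_cast h
    subst this; rfl
  · intro h; subst h; exact idx_get friends hnd k hk

-- ---- small helpers ----
lemma len2 {α : Type} (l : List α) (h : l.length = 2) : ∃ a b, l = [a, b] := by
  match l, h with
  | [a, b], _ => exact ⟨a, b, rfl⟩

lemma sum_ite_nat {α : Type} (l : List α) (p : α → Prop) [DecidablePred p] :
    (l.map (fun x => if p x then (1 : Nat) else 0)).sum = l.countP (fun x => decide (p x)) := by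
  induction l with
  | nil => rfl
  | cons a t ih => simp only [List.map_cons, List.sum_cons, List.countP_cons, ih]; split_ifs <;> simp_all <;> omega

lemma keyP_bounds (friends gifts : List String) (hnd : friends.Nodup)
    (hp : ∀ g ∈ gifts, (pvSplit g).length = 2 ∧ ∀ t ∈ pvSplit g, t ∈ friends)
    (g : String) (hg : g ∈ gifts) :
    (0 ≤ (pvKeyP friends g).1 ∧ (pvKeyP friends g).1 < (friends.length : Int)) ∧
      (0 ≤ (pvKeyP friends g).2 ∧ (pvKeyP friends g).2 < (friends.length : Int)) := by
  obtain ⟨h2, hmem⟩ := hp g hg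
  obtain ⟨a, b, hab⟩ := len2 _ h2
  have ha := idx_mem friends hnd a (hmem a (by rw [hab]; simp))
  have hb := idx_mem friends hnd b (hmem b (by rw [hab]; simp))
  unfold pvKeyP pvKey2
  rw [hab]
  exact ⟨⟨ha.1, by exact_mod_cast ha.2⟩, ⟨hb.1, by exact_mod_cast hb.2⟩⟩

-- ---- the matrix (A side) ----
def pvArrStep (dic : PySem.Dict String Int) (arr : List (List Int)) (g : String) :
    List (List Int) :=
  match pvSplit g with
  | [give, rec] => pvBump arr ((dic.getD give 0).toNat) ((dic.getD rec 0).toNat)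
  | _ => arr

lemma pvArr_eq (dic : PySem.Dict String Int) (n : Nat) (gifts : List String) :
    pvArr dic n gifts = gifts.foldl (pvArrStep dic) (List.replicate n (List.replicate n 0)) := rfl

lemma shape_bump (arr : List (List Int)) (n : Nat) (h1 : arr.length = n)
    (h2 : ∀ row ∈ arr, row.length = n) (i j : Nat) :
    (pvBump arr i j).length = n ∧ ∀ row ∈ pvBump arr i j, row.length = n := by
  refine ⟨by simp [pvBump, h1], ?_⟩
  intro row hr
  rw [List.mem_iff_getElem] at hr
  obtain ⟨k, hk, rfl⟩ := hr
  unfold pvBump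
  rw [List.getElem_modify]
  split
  · rw [List.length_modify]
    exact h2 _ (List.getElem_mem _)
  · exact h2 _ (List.getElem_mem _)

lemma entry_bump (arr : List (List Int)) (n : Nat) (h1 : arr.length = n)
    (h2 : ∀ row ∈ arr, row.length = n) (i' j' i j : Nat)
    (hi' : i' < n) (hj' : j' < n) (hi : i < n) (hj : j < n) :
    pvEntry (pvBump arr i' j') i j = pvEntry arr i j + (if i = i' ∧ j = j' then 1 else 0) := by
  have hia : i < arr.length := by omega
  have hrowlen : arr[i].length = n := h2 _ (List.getElem_mem _)
  unfold pvEntry pvBump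
  rw [List.getD_eq_getElem _ _ (show i < (arr.modify i' (fun row => row.modify j' (· + 1))).length by
    rw [List.length_modify]; omega)]
  simp only [List.getElem_modify]
  rw [List.getD_eq_getElem _ _ hia]
  by_cases hii : i' = i
  · simp only [if_pos hii]
    rw [List.getD_eq_getElem _ _ (show j < (arr[i].modify j' (· + 1)).length by
      rw [List.length_modify]; omega)]
    simp only [List.getElem_modify]
    rw [List.getD_eq_getElem _ _ (show j < arr[i].length by omega)]
    split_ifs <;> omega
  · simp only [if_neg hii]
    split_ifs <;> omega

lemma pvArr_fold (friends gifts : List String) (hnd : friends.Nodup)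
    (hp : ∀ g ∈ gifts, (pvSplit g).length = 2 ∧ ∀ t ∈ pvSplit g, t ∈ friends)
    (arr : List (List Int)) (h1 : arr.length = friends.length)
    (h2 : ∀ row ∈ arr, row.length = friends.length) :
    (gifts.foldl (pvArrStep (pvMkDic friends)) arr).length = friends.length ∧
    (∀ row ∈ gifts.foldl (pvArrStep (pvMkDic friends)) arr, row.length = friends.length) ∧
    ∀ i j : Nat, i < friends.length → j < friends.length →
      pvEntry (gifts.foldl (pvArrStep (pvMkDic friends)) arr) i j
        = pvEntry arr i j + ((gifts.map (pvKeyP friends)).count ((i : Int), (j : Int)) : Int) := by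
  induction gifts generalizing arr with
  | nil => exact ⟨h1, h2, by intro i j hi hj; simp⟩
  | cons g t ih =>
    obtain ⟨hg2, hgmem⟩ := hp g List.mem_cons_self
    obtain ⟨a, b, hab⟩ := len2 _ hg2
    have hb := keyP_bounds friends (g :: t) hnd hp g List.mem_cons_self
    have hkey : pvKeyP friends g = (pvIdx friends a, pvIdx friends b) := by
      unfold pvKeyP pvKey2; rw [hab]
    have hstep : pvArrStep (pvMkDic friends) arr g
        = pvBump arr (pvIdx friends a).toNat (pvIdx friends b).toNat := by
      unfold pvArrStep; rw [hab]; rfl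
    have hiaN : (pvIdx friends a).toNat < friends.length := by
      rw [hkey] at hb; omega
    have hibN : (pvIdx friends b).toNat < friends.length := by
      rw [hkey] at hb; omega
    have hsh := shape_bump arr friends.length h1 h2 (pvIdx friends a).toNat (pvIdx friends b).toNat
    have ihh := ih (fun g hg => hp g (List.mem_cons_of_mem _ hg))
      (pvBump arr (pvIdx friends a).toNat (pvIdx friends b).toNat) hsh.1 hsh.2
    simp only [List.foldl_cons, hstep]
    refine ⟨ihh.1, ihh.2.1, ?_⟩
    intro i j hi hj
    rw [ihh.2.2 i j hi hj]
    rw [entry_bump arr friends.length h1 h2 _ _ i j hiaN hibN hi hj]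
    simp only [List.map_cons, List.count_cons, hkey, beq_iff_eq, Prod.mk.injEq]
    have hge : 0 ≤ pvIdx friends a ∧ 0 ≤ pvIdx friends b := by rw [hkey] at hb; exact ⟨hb.1.1, hb.2.1⟩
    by_cases hc : i = (pvIdx friends a).toNat ∧ j = (pvIdx friends b).toNat
    · rw [if_pos hc, if_pos (by push_cast; omega)]
      push_cast; omega
    · rw [if_neg hc, if_neg (by push_cast; omega)]
      push_cast; omega

lemma pvArr_shape (friends gifts : List String) (hnd : friends.Nodup)
    (hp : ∀ g ∈ gifts, (pvSplit g).length = 2 ∧ ∀ t ∈ pvSplit g, t ∈ friends) :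
    (pvArr (pvMkDic friends) friends.length gifts).length = friends.length ∧
    ∀ row ∈ pvArr (pvMkDic friends) friends.length gifts, row.length = friends.length := by
  rw [pvArr_eq]
  have := pvArr_fold friends gifts hnd hp (List.replicate friends.length (List.replicate friends.length 0))
    (by simp) (by intro row hr; rw [List.eq_of_mem_replicate hr]; simp)
  exact ⟨this.1, this.2.1⟩

lemma pvArr_entry (friends gifts : List String) (hnd : friends.Nodup)
    (hp : ∀ g ∈ gifts, (pvSplit g).length = 2 ∧ ∀ t ∈ pvSplit g, t ∈ friends)
    (i j : Nat) (hi : i < friends.length) (hj : j < friends.length) :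
    pvEntry (pvArr (pvMkDic friends) friends.length gifts) i j = pvC friends gifts i j := by
  rw [pvArr_eq]
  have := pvArr_fold friends gifts hnd hp (List.replicate friends.length (List.replicate friends.length 0))
    (by simp) (by intro row hr; rw [List.eq_of_mem_replicate hr]; simp)
  rw [this.2.2 i j hi hj]
  have hz : pvEntry (List.replicate friends.length (List.replicate friends.length (0:Int))) i j = 0 := by
    unfold pvEntry
    rw [List.getD_eq_getElem _ _ (show i < (List.replicate friends.length (List.replicate friends.length (0:Int))).length by simpa using hi)]
    rw [List.getElem_replicate]
    rw [List.getD_eq_getElem _ _ (show j < (List.replicate friends.length (0:Int)).length by simpa using hj)]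
    rw [List.getElem_replicate]
  rw [hz, pvC]; ring

-- ---- sums of counts ----
lemma map_getD_range (l : List Int) :
    (List.range l.length).map (fun j => l.getD j 0) = l := by
  apply List.ext_getElem
  · simp
  · intro k h1 h2
    simp only [List.getElem_map, List.getElem_range]
    rw [List.getD_eq_getElem _ _ (by simpa using h2)]

lemma sum_ite_int {α : Type} (l : List α) (q : α → Prop) [DecidablePred q] :
    (l.map (fun x => if q x then (1 : Int) else 0)).sum
      = (l.countP (fun x => decide (q x)) : Int) := by
  induction l with
  | nil => rfl
  | cons a t ih =>
    simp only [List.map_cons, List.sum_cons, List.countP_cons, ih]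
    by_cases h : q a
    · simp [h]; push_cast; ring
    · simp [h]

lemma countP_eq_single (n : Nat) (x : Int) (h0 : 0 ≤ x) (hx : x < (n : Int)) :
    (List.range n).countP (fun (i : Nat) => decide (x = (i : Int))) = 1 := by
  have h1 : (List.range n).countP (fun (i : Nat) => decide (x = (i : Int)))
      = (List.range n).countP (fun i => i == x.toNat) := by
    apply List.countP_congr
    intro i _
    simp only [decide_eq_true_eq, beq_iff_eq]
    omega
  rw [h1]
  have : (List.range n).countP (fun i => i == x.toNat) = List.count x.toNat (List.range n) := by
    simp [List.count]
  rw [this, List.count_eq_one_of_mem List.nodup_range (by rw [List.mem_range]; omega)]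

lemma count_single_fst (l : List (Int × Int)) (n : Nat)
    (hb : ∀ p ∈ l, 0 ≤ p.1 ∧ p.1 < (n : Int)) (j : Nat) :
    ((List.range n).map (fun (i : Nat) => ((l.count ((i : Int), (j : Int))) : Int))).sum
      = (l.countP (fun p => p.2 == (j : Int)) : Int) := by
  induction l with
  | nil => simp
  | cons p t ih =>
    obtain ⟨p1, p2⟩ := p
    have hb' : ∀ q ∈ t, 0 ≤ q.1 ∧ q.1 < (n : Int) := fun q hq => hb q (List.mem_cons_of_mem _ hq)
    have hp := hb (p1, p2) List.mem_cons_self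
    have hmap : (List.range n).map (fun (i : Nat) => ((List.count ((i:Int),(j:Int)) ((p1,p2) :: t)) : Int))
        = (List.range n).map (fun (i : Nat) => ((List.count ((i:Int),(j:Int)) t) : Int)
            + (if (p1, p2) = ((i:Int),(j:Int)) then (1:Int) else 0)) := by
      apply List.map_congr_left
      intro i _
      rw [List.count_cons]
      by_cases h : (p1, p2) = ((i:Int),(j:Int))
      · rw [if_pos (beq_iff_eq.mpr h), if_pos h]; push_cast; ring
      · rw [if_neg (fun hh => h (beq_iff_eq.mp hh)), if_neg h]; push_cast; ring
    rw [hmap, PySem.List.sum_map_add_int, ih hb', List.countP_cons,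
      sum_ite_int (List.range n) (fun (i : Nat) => (p1, p2) = ((i:Int),(j:Int)))]
    have key : ((List.range n).countP (fun (i : Nat) => decide ((p1, p2) = ((i:Int),(j:Int)))) : Int)
        = if p2 = (j : Int) then 1 else 0 := by
      by_cases hj : p2 = (j : Int)
      · rw [if_pos hj]
        have h1 : (List.range n).countP (fun (i : Nat) => decide ((p1, p2) = ((i:Int),(j:Int))))
            = (List.range n).countP (fun (i : Nat) => decide (p1 = (i : Int))) := by
          apply List.countP_congr
          intro i _
          simp [Prod.mk.injEq, hj]
        rw [h1, countP_eq_single n p1 hp.1 (by simpa using hp.2)]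
        simp
      · rw [if_neg hj]
        have : (List.range n).countP (fun (i : Nat) => decide ((p1, p2) = ((i:Int),(j:Int)))) = 0 := by
          apply List.countP_eq_zero.2
          intro i _
          simp only [decide_eq_true_eq, Prod.mk.injEq]
          tauto
        rw [this]; rfl
    rw [key]
    by_cases hj : p2 = (j : Int)
    · rw [if_pos hj, if_pos (beq_iff_eq.mpr hj)]; push_cast; ring
    · rw [if_neg hj, if_neg (fun hh => hj (beq_iff_eq.mp hh))]; push_cast; ring

lemma count_single_snd (l : List (Int × Int)) (n : Nat)
    (hb : ∀ p ∈ l, 0 ≤ p.2 ∧ p.2 < (n : Int)) (i : Nat) :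
    ((List.range n).map (fun (j : Nat) => ((l.count ((i : Int), (j : Int))) : Int))).sum
      = (l.countP (fun p => p.1 == (i : Int)) : Int) := by
  induction l with
  | nil => simp
  | cons p t ih =>
    obtain ⟨p1, p2⟩ := p
    have hb' : ∀ q ∈ t, 0 ≤ q.2 ∧ q.2 < (n : Int) := fun q hq => hb q (List.mem_cons_of_mem _ hq)
    have hp := hb (p1, p2) List.mem_cons_self
    have hmap : (List.range n).map (fun (j : Nat) => ((List.count ((i:Int),(j:Int)) ((p1,p2) :: t)) : Int))
        = (List.range n).map (fun (j : Nat) => ((List.count ((i:Int),(j:Int)) t) : Int)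
            + (if (p1, p2) = ((i:Int),(j:Int)) then (1:Int) else 0)) := by
      apply List.map_congr_left
      intro j _
      rw [List.count_cons]
      by_cases h : (p1, p2) = ((i:Int),(j:Int))
      · rw [if_pos (beq_iff_eq.mpr h), if_pos h]; push_cast; ring
      · rw [if_neg (fun hh => h (beq_iff_eq.mp hh)), if_neg h]; push_cast; ring
    rw [hmap, PySem.List.sum_map_add_int, ih hb', List.countP_cons,
      sum_ite_int (List.range n) (fun (j : Nat) => (p1, p2) = ((i:Int),(j:Int)))]
    have key : ((List.range n).countP (fun (j : Nat) => decide ((p1, p2) = ((i:Int),(j:Int)))) : Int)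
        = if p1 = (i : Int) then 1 else 0 := by
      by_cases hi : p1 = (i : Int)
      · rw [if_pos hi]
        have h1 : (List.range n).countP (fun (j : Nat) => decide ((p1, p2) = ((i:Int),(j:Int))))
            = (List.range n).countP (fun (j : Nat) => decide (p2 = (j : Int))) := by
          apply List.countP_congr
          intro j _
          simp [Prod.mk.injEq, hi]
        rw [h1, countP_eq_single n p2 hp.1 (by simpa using hp.2)]
        simp
      · rw [if_neg hi]
        have : (List.range n).countP (fun (j : Nat) => decide ((p1, p2) = ((i:Int),(j:Int)))) = 0 := by
          apply List.countP_eq_zero.2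
          intro j _
          simp only [decide_eq_true_eq, Prod.mk.injEq]
          tauto
        rw [this]; rfl
    rw [key]
    by_cases hi : p1 = (i : Int)
    · rw [if_pos hi, if_pos (beq_iff_eq.mpr hi)]; push_cast; ring
    · rw [if_neg hi, if_neg (fun hh => hi (beq_iff_eq.mp hh))]; push_cast; ring

-- ---- g_index (A side) ----
lemma pvGIndex_fold (dic : PySem.Dict String Int) (arr : List (List Int)) (n : Nat)
    (l : List String) (d : PySem.Dict Int Int) (x : Int) :
    (l.foldl (fun gi f =>
      let idx := (dic.getD f 0).toNat
      let give := (arr.getD idx []).sum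
      let given := ((List.range n).map (fun i => pvEntry arr i idx)).sum
      gi.insert (idx : Int) (give - given)) d).getD x 0
    = if x ∈ l.map (fun f => (((dic.getD f 0).toNat : Nat) : Int))
      then (arr.getD x.toNat []).sum - ((List.range n).map (fun i => pvEntry arr i x.toNat)).sum
      else d.getD x 0 := by
  induction l generalizing d with
  | nil => simp
  | cons a t ih =>
    simp only [List.foldl_cons, List.map_cons, List.mem_cons, ih]
    by_cases hm : x ∈ t.map (fun f => (((dic.getD f 0).toNat : Nat) : Int))
    · rw [if_pos hm, if_pos (Or.inr hm)]
    · rw [if_neg hm]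
      by_cases hx : x = (((dic.getD a 0).toNat : Nat) : Int)
      · rw [if_pos (Or.inl hx)]
        subst hx
        rw [PySem.Dict.getD_insert_self]
        simp only [Int.toNat_natCast]
      · rw [if_neg (by tauto), PySem.Dict.getD_insert_of_ne _ _ _ hx]

lemma pvGIndex_getD (friends gifts : List String) (hnd : friends.Nodup)
    (hp : ∀ g ∈ gifts, (pvSplit g).length = 2 ∧ ∀ t ∈ pvSplit g, t ∈ friends)
    (i : Nat) (hi : i < friends.length) :
    (pvGIndex (pvMkDic friends) (pvArr (pvMkDic friends) friends.length gifts)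
        friends.length friends).getD (i : Int) 0 = pvSc friends gifts i := by
  have hbnd : ∀ p ∈ gifts.map (pvKeyP friends),
      (0 ≤ p.1 ∧ p.1 < (friends.length : Int)) ∧ (0 ≤ p.2 ∧ p.2 < (friends.length : Int)) := by
    intro p hp2
    obtain ⟨g, hg, rfl⟩ := List.mem_map.1 hp2
    exact keyP_bounds friends gifts hnd hp g hg
  have hshape := pvArr_shape friends gifts hnd hp
  unfold pvGIndex
  rw [pvGIndex_fold]
  have hmem : (i : Int) ∈ friends.map (fun f => ((((pvMkDic friends).getD f 0).toNat : Nat) : Int)) := by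
    apply List.mem_map.2
    refine ⟨friends[i], List.getElem_mem hi, ?_⟩
    show ((pvIdx friends friends[i]).toNat : Int) = (i : Int)
    rw [idx_get friends hnd i hi]
    simp [Int.toNat_natCast]
  rw [if_pos hmem, Int.toNat_natCast]
  have hlen : (pvArr (pvMkDic friends) friends.length gifts).length = friends.length := hshape.1
  have hrowlen : ((pvArr (pvMkDic friends) friends.length gifts).getD i []).length = friends.length := by
    rw [List.getD_eq_getElem _ _ (by omega)]
    exact hshape.2 _ (List.getElem_mem _)
  have hsum1 : ((pvArr (pvMkDic friends) friends.length gifts).getD i []).sum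
      = ((List.range friends.length).map
          (fun (j : Nat) => pvEntry (pvArr (pvMkDic friends) friends.length gifts) i j)).sum := by
    conv_lhs => rw [← map_getD_range ((pvArr (pvMkDic friends) friends.length gifts).getD i [])]
    rw [hrowlen]
    exact congrArg List.sum (List.map_congr_left (fun j _ => rfl))
  have hsum1' : ((List.range friends.length).map
      (fun (j : Nat) => pvEntry (pvArr (pvMkDic friends) friends.length gifts) i j)).sum
      = pvCG friends gifts i := by
    have hcongr : (List.range friends.length).map
        (fun (j : Nat) => pvEntry (pvArr (pvMkDic friends) friends.length gifts) i j)
        = (List.range friends.length).map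
          (fun (j : Nat) => (((gifts.map (pvKeyP friends)).count ((i : Int), (j : Int))) : Int)) := by
      apply List.map_congr_left
      intro j hj
      rw [pvArr_entry friends gifts hnd hp i j hi (List.mem_range.1 hj)]
      rfl
    rw [hcongr, count_single_snd (gifts.map (pvKeyP friends)) friends.length
      (fun p hp2 => (hbnd p hp2).2) i]
    rfl
  have hsum2 : ((List.range friends.length).map
      (fun (i2 : Nat) => pvEntry (pvArr (pvMkDic friends) friends.length gifts) i2 i)).sum
      = pvCR friends gifts i := by
    have hcongr : (List.range friends.length).map
        (fun (i2 : Nat) => pvEntry (pvArr (pvMkDic friends) friends.length gifts) i2 i)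
        = (List.range friends.length).map
          (fun (i2 : Nat) => (((gifts.map (pvKeyP friends)).count ((i2 : Int), (i : Int))) : Int)) := by
      apply List.map_congr_left
      intro i2 hi2
      rw [pvArr_entry friends gifts hnd hp i2 i (List.mem_range.1 hi2) hi]
      rfl
    rw [hcongr, count_single_fst (gifts.map (pvKeyP friends)) friends.length
      (fun p hp2 => (hbnd p hp2).1) i]
    rfl
  rw [hsum1, hsum1', hsum2]
  rfl

-- ---- A-side result dict ----
def pvUpd (arr : List (List Int)) (gIndex : PySem.Dict Int Int)
    (r : PySem.Dict Int Int) (p : Nat × Nat) : PySem.Dict Int Int :=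
  if pvEntry arr p.1 p.2 > pvEntry arr p.2 p.1 then r.modify (p.1 : Int) 0 (· + 1)
  else if pvEntry arr p.1 p.2 < pvEntry arr p.2 p.1 then r.modify (p.2 : Int) 0 (· + 1)
  else if gIndex.getD (p.1 : Int) 0 > gIndex.getD (p.2 : Int) 0 then r.modify (p.1 : Int) 0 (· + 1)
  else if gIndex.getD (p.1 : Int) 0 < gIndex.getD (p.2 : Int) 0 then r.modify (p.2 : Int) 0 (· + 1)
  else r

lemma pvResult_pairs (arr : List (List Int)) (gIndex : PySem.Dict Int Int) (n : Nat) :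
    pvResult arr gIndex n =
      ((List.range n).flatMap (fun i => (List.range' (i+1) (n-(i+1))).map (fun j => (i, j)))).foldl
        (pvUpd arr gIndex)
        ((List.range n).foldl (fun r (k : Nat) => r.insert (k : Int) 0) PySem.Dict.empty) := by
  rw [List.foldl_flatMap]
  unfold pvResult
  have h : ∀ (acc : PySem.Dict Int Int) (i : Nat),
      ((List.range' (i+1) (n-(i+1))).map (fun j => (i, j))).foldl (pvUpd arr gIndex) acc
        = (List.range' (i+1) (n-(i+1))).foldl (fun r j =>
            if pvEntry arr i j > pvEntry arr j i then r.modify (i : Int) 0 (· + 1)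
            else if pvEntry arr i j < pvEntry arr j i then r.modify (j : Int) 0 (· + 1)
            else if gIndex.getD (i : Int) 0 > gIndex.getD (j : Int) 0 then r.modify (i : Int) 0 (· + 1)
            else if gIndex.getD (i : Int) 0 < gIndex.getD (j : Int) 0 then r.modify (j : Int) 0 (· + 1)
            else r) acc := by
    intro acc i
    rw [List.foldl_map]
    rfl
  simp only [h]

lemma foldl_insert_zero_getD (l : List Nat) (d : PySem.Dict Int Int) (x : Int)
    (hd : d.getD x 0 = 0) :
    (l.foldl (fun r (k : Nat) => r.insert (k : Int) 0) d).getD x 0 = 0 := by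
  induction l generalizing d with
  | nil => exact hd
  | cons a t ih =>
    simp only [List.foldl_cons]
    apply ih
    by_cases hx : x = ((a : Nat) : Int)
    · subst hx; rw [PySem.Dict.getD_insert_self]
    · rw [PySem.Dict.getD_insert_of_ne _ _ _ hx]; exact hd

lemma modify_getD_indicator (r : PySem.Dict Int Int) (m k : Nat) :
    (r.modify (m : Int) 0 (· + 1)).getD (k : Int) 0
      = r.getD (k : Int) 0 + (if k = m then 1 else 0) := by
  rw [PySem.Dict.getD_modify]
  by_cases h : (k : Int) = (m : Int)
  · rw [if_pos h, if_pos (Nat.cast_inj.mp h), h]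
  · rw [if_neg h, if_neg (fun hh => h (by exact_mod_cast congrArg (Nat.cast : Nat → Int) hh))]
    ring

lemma upd_getD (friends gifts : List String) (hnd : friends.Nodup)
    (hp : ∀ g ∈ gifts, (pvSplit g).length = 2 ∧ ∀ t ∈ pvSplit g, t ∈ friends)
    (p : Nat × Nat) (hp1 : p.1 < friends.length) (hp2 : p.2 < friends.length)
    (r : PySem.Dict Int Int) (k : Nat) :
    (pvUpd (pvArr (pvMkDic friends) friends.length gifts)
        (pvGIndex (pvMkDic friends) (pvArr (pvMkDic friends) friends.length gifts)
          friends.length friends)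
        r p).getD (k : Int) 0
      = r.getD (k : Int) 0 + (if (p.1 = k ∧ pvBeat friends gifts k p.2)
          ∨ (p.2 = k ∧ pvBeat friends gifts k p.1) then 1 else 0) := by
  obtain ⟨p1, p2⟩ := p
  simp only at hp1 hp2
  unfold pvUpd
  simp only
  rw [pvArr_entry friends gifts hnd hp p1 p2 hp1 hp2,
      pvArr_entry friends gifts hnd hp p2 p1 hp2 hp1,
      pvGIndex_getD friends gifts hnd hp p1 hp1,
      pvGIndex_getD friends gifts hnd hp p2 hp2]
  by_cases h1 : pvC friends gifts p1 p2 > pvC friends gifts p2 p1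
  · rw [if_pos h1, modify_getD_indicator]
    have he : (if k = p1 then (1:Int) else 0)
        = (if (p1 = k ∧ pvBeat friends gifts k p2) ∨ (p2 = k ∧ pvBeat friends gifts k p1)
            then (1:Int) else 0) := by
      by_cases hk : k = p1
      · have hb : pvBeat friends gifts k p2 := by rw [hk]; exact Or.inl h1
        rw [if_pos hk, if_pos (Or.inl ⟨hk.symm, hb⟩)]
      · have hno : ¬ ((p1 = k ∧ pvBeat friends gifts k p2) ∨ (p2 = k ∧ pvBeat friends gifts k p1)) := by
          rintro (⟨h, _⟩ | ⟨h, hb⟩)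
          · exact hk h.symm
          · subst h; unfold pvBeat at hb; omega
        rw [if_neg hk, if_neg hno]
    rw [he]
  · rw [if_neg h1]
    by_cases h2 : pvC friends gifts p1 p2 < pvC friends gifts p2 p1
    · rw [if_pos h2, modify_getD_indicator]
      have he : (if k = p2 then (1:Int) else 0)
          = (if (p1 = k ∧ pvBeat friends gifts k p2) ∨ (p2 = k ∧ pvBeat friends gifts k p1)
              then (1:Int) else 0) := by
        by_cases hk : k = p2
        · have hb : pvBeat friends gifts k p1 := by rw [hk]; exact Or.inl h2
          rw [if_pos hk, if_pos (Or.inr ⟨hk.symm, hb⟩)]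
        · have hno : ¬ ((p1 = k ∧ pvBeat friends gifts k p2) ∨ (p2 = k ∧ pvBeat friends gifts k p1)) := by
            rintro (⟨h, hb⟩ | ⟨h, _⟩)
            · subst h; unfold pvBeat at hb; omega
            · exact hk h.symm
          rw [if_neg hk, if_neg hno]
      rw [he]
    · rw [if_neg h2]
      by_cases h3 : pvSc friends gifts p1 > pvSc friends gifts p2
      · rw [if_pos h3, modify_getD_indicator]
        have he : (if k = p1 then (1:Int) else 0)
            = (if (p1 = k ∧ pvBeat friends gifts k p2) ∨ (p2 = k ∧ pvBeat friends gifts k p1)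
                then (1:Int) else 0) := by
          by_cases hk : k = p1
          · have hb : pvBeat friends gifts k p2 := by rw [hk]; exact Or.inr ⟨by omega, h3⟩
            rw [if_pos hk, if_pos (Or.inl ⟨hk.symm, hb⟩)]
          · have hno : ¬ ((p1 = k ∧ pvBeat friends gifts k p2) ∨ (p2 = k ∧ pvBeat friends gifts k p1)) := by
              rintro (⟨h, _⟩ | ⟨h, hb⟩)
              · exact hk h.symm
              · subst h; unfold pvBeat at hb; omega
            rw [if_neg hk, if_neg hno]
        rw [he]
      · rw [if_neg h3]
        by_cases h4 : pvSc friends gifts p1 < pvSc friends gifts p2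
        · rw [if_pos h4, modify_getD_indicator]
          have he : (if k = p2 then (1:Int) else 0)
              = (if (p1 = k ∧ pvBeat friends gifts k p2) ∨ (p2 = k ∧ pvBeat friends gifts k p1)
                  then (1:Int) else 0) := by
            by_cases hk : k = p2
            · have hb : pvBeat friends gifts k p1 := by rw [hk]; exact Or.inr ⟨by omega, h4⟩
              rw [if_pos hk, if_pos (Or.inr ⟨hk.symm, hb⟩)]
            · have hno : ¬ ((p1 = k ∧ pvBeat friends gifts k p2) ∨ (p2 = k ∧ pvBeat friends gifts k p1)) := by
                rintro (⟨h, hb⟩ | ⟨h, _⟩)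
                · subst h; unfold pvBeat at hb; omega
                · exact hk h.symm
              rw [if_neg hk, if_neg hno]
          rw [he]
        · rw [if_neg h4]
          have hno : ¬ ((p1 = k ∧ pvBeat friends gifts k p2) ∨ (p2 = k ∧ pvBeat friends gifts k p1)) := by
            rintro (⟨h, hb⟩ | ⟨h, hb⟩) <;> (subst h; unfold pvBeat at hb; omega)
          rw [if_neg hno]
          ring

lemma upd_fold (friends gifts : List String) (hnd : friends.Nodup)
    (hp : ∀ g ∈ gifts, (pvSplit g).length = 2 ∧ ∀ t ∈ pvSplit g, t ∈ friends)
    (P : List (Nat × Nat))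
    (hP : ∀ p ∈ P, p.1 < friends.length ∧ p.2 < friends.length)
    (r : PySem.Dict Int Int) (k : Nat) :
    ((P.foldl (pvUpd (pvArr (pvMkDic friends) friends.length gifts)
        (pvGIndex (pvMkDic friends) (pvArr (pvMkDic friends) friends.length gifts)
          friends.length friends)) r).getD (k : Int) 0)
      = r.getD (k : Int) 0
        + (P.countP (fun p => decide ((p.1 = k ∧ pvBeat friends gifts k p.2)
            ∨ (p.2 = k ∧ pvBeat friends gifts k p.1))) : Int) := by
  induction P generalizing r with
  | nil => simp
  | cons p t ih =>
    simp only [List.foldl_cons, List.countP_cons]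
    rw [ih (fun q hq => hP q (List.mem_cons_of_mem _ hq))]
    rw [upd_getD friends gifts hnd hp p (hP p List.mem_cons_self).1 (hP p List.mem_cons_self).2 r k]
    by_cases h : (p.1 = k ∧ pvBeat friends gifts k p.2) ∨ (p.2 = k ∧ pvBeat friends gifts k p.1)
    · rw [if_pos h, if_pos (decide_eq_true h)]; push_cast; ring
    · rw [if_neg h, if_neg (fun hh => h (of_decide_eq_true hh))]; push_cast; ring

lemma countP_range'_single (s n k : Nat) (hmem : s ≤ k ∧ k < s + n) :
    (List.range' s n).countP (fun (j : Nat) => decide (j = k)) = 1 := by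
  have h1 : (List.range' s n).countP (fun (j : Nat) => decide (j = k))
      = List.count k (List.range' s n) := by
    simp only [List.count]
    apply List.countP_congr
    intro x _
    simp
  rw [h1]
  apply List.count_eq_one_of_mem (List.nodup_range' 1)
  rw [List.mem_range']
  exact ⟨k - s, by omega, by omega⟩

lemma countP_pairs (friends gifts : List String) (n k : Nat) (hk : k < n) :
    ((List.range n).flatMap (fun i => (List.range' (i+1) (n-(i+1))).map (fun j => (i, j)))).countP
        (fun p => decide ((p.1 = k ∧ pvBeat friends gifts k p.2)
          ∨ (p.2 = k ∧ pvBeat friends gifts k p.1)))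
      = (List.range n).countP (fun j => decide (pvBeat friends gifts k j)) := by
  rw [List.countP_flatMap]
  have hterm : (List.range n).map
      ((List.countP (fun p => decide ((p.1 = k ∧ pvBeat friends gifts k p.2)
          ∨ (p.2 = k ∧ pvBeat friends gifts k p.1))))
        ∘ (fun i => (List.range' (i+1) (n-(i+1))).map (fun j => (i, j))))
      = (List.range n).map (fun (i : Nat) =>
          if i = k then (List.range' (k+1) (n-(k+1))).countP (fun j => decide (pvBeat friends gifts k j))
          else if i < k ∧ pvBeat friends gifts k i then 1 else 0) := by
    apply List.map_congr_left
    intro i _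
    simp only [Function.comp_apply, List.countP_map]
    by_cases hik : i = k
    · subst hik
      rw [if_pos rfl]
      apply List.countP_congr
      intro j hj
      have hjk : ¬ j = i := by rw [List.mem_range'] at hj; omega
      simp only [Function.comp_apply, decide_eq_true_eq]
      constructor
      · rintro (⟨_, h⟩ | ⟨h, _⟩)
        · exact h
        · exact absurd h hjk
      · intro h; exact Or.inl ⟨by trivial, h⟩
    · rw [if_neg hik]
      by_cases hb : i < k ∧ pvBeat friends gifts k i
      · rw [if_pos hb]
        have hcongr : (List.range' (i+1) (n-(i+1))).countP
            ((fun p => decide ((p.1 = k ∧ pvBeat friends gifts k p.2)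
              ∨ (p.2 = k ∧ pvBeat friends gifts k p.1))) ∘ (fun j => (i, j)))
            = (List.range' (i+1) (n-(i+1))).countP (fun (j : Nat) => decide (j = k)) := by
          apply List.countP_congr
          intro j _
          simp only [Function.comp_apply, decide_eq_true_eq]
          constructor
          · rintro (⟨h, _⟩ | ⟨h, _⟩)
            · exact absurd h hik
            · exact h
          · intro h; exact Or.inr ⟨h, hb.2⟩
        rw [hcongr, countP_range'_single (i+1) (n-(i+1)) k ⟨by omega, by omega⟩]
      · rw [if_neg hb]
        apply List.countP_eq_zero.2
        intro j hj
        simp only [Function.comp_apply, decide_eq_true_eq]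
        rintro (⟨h, _⟩ | ⟨h, hb2⟩)
        · exact hik h
        · rw [List.mem_range'] at hj
          exact hb ⟨by omega, hb2⟩
  rw [hterm]
  have hsplit : List.range n = List.range' 0 k ++ k :: List.range' (k+1) (n-(k+1)) := by
    rw [List.range_eq_range']
    have h4 : (k :: List.range' (k+1) (n-(k+1))) = List.range' k ((n-(k+1))+1) :=
      (List.range'_succ (s := k) (n := n-(k+1)) (step := 1)).symm
    rw [h4]
    have h5 := List.range'_append (s := 0) (m := k) (n := (n-(k+1))+1) (step := 1)
    simp only [Nat.one_mul, Nat.zero_add] at h5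
    rw [h5]
    congr 1
    omega
  rw [hsplit]
  simp only [List.map_append, List.map_cons, List.sum_append, List.sum_cons,
    List.countP_append, List.countP_cons]
  have hpiece1 : ((List.range' 0 k).map (fun (i : Nat) =>
      if i = k then (List.range' (k+1) (n-(k+1))).countP (fun j => decide (pvBeat friends gifts k j))
      else if i < k ∧ pvBeat friends gifts k i then 1 else 0)).sum
      = (List.range' 0 k).countP (fun i => decide (pvBeat friends gifts k i)) := by
    have hcongr : (List.range' 0 k).map (fun (i : Nat) =>
        if i = k then (List.range' (k+1) (n-(k+1))).countP (fun j => decide (pvBeat friends gifts k j))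
        else if i < k ∧ pvBeat friends gifts k i then 1 else 0)
        = (List.range' 0 k).map (fun (i : Nat) => if pvBeat friends gifts k i then 1 else 0) := by
      apply List.map_congr_left
      intro i hi
      rw [List.mem_range'] at hi
      rw [if_neg (by omega)]
      by_cases hb : pvBeat friends gifts k i
      · rw [if_pos ⟨by omega, hb⟩, if_pos hb]
      · rw [if_neg (by tauto), if_neg hb]
    rw [hcongr, sum_ite_nat]
  have hpiece3 : ((List.range' (k+1) (n-(k+1))).map (fun (i : Nat) =>
      if i = k then (List.range' (k+1) (n-(k+1))).countP (fun j => decide (pvBeat friends gifts k j))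
      else if i < k ∧ pvBeat friends gifts k i then 1 else 0)).sum = 0 := by
    have hcongr : (List.range' (k+1) (n-(k+1))).map (fun (i : Nat) =>
        if i = k then (List.range' (k+1) (n-(k+1))).countP (fun j => decide (pvBeat friends gifts k j))
        else if i < k ∧ pvBeat friends gifts k i then 1 else 0)
        = (List.range' (k+1) (n-(k+1))).map (fun (_ : Nat) => (0 : Nat)) := by
      apply List.map_congr_left
      intro i hi
      rw [List.mem_range'] at hi
      rw [if_neg (by omega), if_neg (by omega)]
    rw [hcongr]
    simp
  rw [hpiece1, hpiece3]
  simp [decide_eq_false (pvBeat_irrefl friends gifts k)]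

-- ---- keys / values of the result dict ----
lemma keys_insert_of_contains (d : PySem.Dict Int Int) (k : Int) (v : Int)
    (h : d.contains k = true) : (d.insert k v).keys = d.keys := by
  simp only [PySem.Dict.keys, PySem.Dict.items_insert_of_contains d v h, List.map_map]
  apply List.map_congr_left
  intro p _
  simp only [Function.comp_apply]
  by_cases h1 : p.1 = k <;> simp [h1]

lemma keys_modify_of_contains (d : PySem.Dict Int Int) (k : Int) (d0 : Int) (f : Int → Int)
    (h : d.contains k = true) : (d.modify k d0 f).keys = d.keys := by
  rw [PySem.Dict.keys_modify]
  exact keys_insert_of_contains _ _ _ h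

lemma r0_keys (n : Nat) :
    ((List.range n).foldl (fun r (k : Nat) => r.insert (k : Int) 0)
        (PySem.Dict.empty : PySem.Dict Int Int)).keys
      = (List.range n).map (fun (k : Nat) => (k : Int)) := by
  refine Eq.trans (PySem.Dict.keys_foldl_insert_key (List.range n) (fun (k : Nat) => (k : Int))
    (fun _ _ => (0 : Int)) PySem.Dict.empty) ?_
  refine Eq.trans (PySem.Set.update_nil_left ((List.range n).map (fun (k : Nat) => (k : Int)))) ?_
  have hnd2 : ((List.range n).map (fun (k : Nat) => (k : Int))).Nodup := by
    refine List.Nodup.map ?_ List.nodup_range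
    intro a b hab
    simp only [] at hab
    exact_mod_cast hab
  exact PySem.Set.ofList_eq_self_of_nodup _ hnd2

lemma upd_keys (friends gifts : List String) (hnd : friends.Nodup)
    (hp : ∀ g ∈ gifts, (pvSplit g).length = 2 ∧ ∀ t ∈ pvSplit g, t ∈ friends)
    (n : Nat) (r : PySem.Dict Int Int) (p : Nat × Nat) (hp1 : p.1 < n) (hp2 : p.2 < n)
    (hk : r.keys = (List.range n).map (fun (k : Nat) => (k : Int))) :
    (pvUpd (pvArr (pvMkDic friends) friends.length gifts)
        (pvGIndex (pvMkDic friends) (pvArr (pvMkDic friends) friends.length gifts)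
          friends.length friends) r p).keys
      = (List.range n).map (fun (k : Nat) => (k : Int)) := by
  have hc : ∀ m : Nat, m < n → r.contains ((m : Nat) : Int) = true := by
    intro m hm
    rw [PySem.Dict.contains_eq_decide_mem_keys, hk]
    simp only [decide_eq_true_eq, List.mem_map]
    exact ⟨m, by simp [hm], rfl⟩
  unfold pvUpd
  split_ifs <;>
    first
      | (rw [keys_modify_of_contains _ _ _ _ (hc p.1 hp1)]; exact hk)
      | (rw [keys_modify_of_contains _ _ _ _ (hc p.2 hp2)]; exact hk)
      | exact hk

lemma fold_upd_keys (friends gifts : List String) (hnd : friends.Nodup)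
    (hp : ∀ g ∈ gifts, (pvSplit g).length = 2 ∧ ∀ t ∈ pvSplit g, t ∈ friends)
    (n : Nat) (P : List (Nat × Nat)) (hP : ∀ p ∈ P, p.1 < n ∧ p.2 < n)
    (r : PySem.Dict Int Int)
    (hk : r.keys = (List.range n).map (fun (k : Nat) => (k : Int))) :
    (P.foldl (pvUpd (pvArr (pvMkDic friends) friends.length gifts)
        (pvGIndex (pvMkDic friends) (pvArr (pvMkDic friends) friends.length gifts)
          friends.length friends)) r).keys
      = (List.range n).map (fun (k : Nat) => (k : Int)) := by
  induction P generalizing r with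
  | nil => exact hk
  | cons p t ih =>
    simp only [List.foldl_cons]
    exact ih (fun q hq => hP q (List.mem_cons_of_mem _ hq))
      _ (upd_keys friends gifts hnd hp n r p (hP p List.mem_cons_self).1 (hP p List.mem_cons_self).2 hk)

lemma P_bounds (n : Nat) :
    ∀ p ∈ (List.range n).flatMap (fun i => (List.range' (i+1) (n-(i+1))).map (fun j => (i, j))),
      p.1 < n ∧ p.2 < n := by
  intro p hpm
  rw [List.mem_flatMap] at hpm
  obtain ⟨i, hi, hpm⟩ := hpm
  rw [List.mem_map] at hpm
  obtain ⟨j, hj, rfl⟩ := hpm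
  rw [List.mem_range] at hi
  rw [List.mem_range'] at hj
  exact ⟨hi, by omega⟩

-- ---- A's value in canonical form ----
lemma A_value (friends gifts : List String) (hnd : friends.Nodup)
    (hp : ∀ g ∈ gifts, (pvSplit g).length = 2 ∧ ∀ t ∈ pvSplit g, t ∈ friends) :
    solution friends gifts = (List.range friends.length).foldl
      (fun acc (k : Nat) => max acc
        (((List.range friends.length).countP (fun j => decide (pvBeat friends gifts k j))) : Int)) 0 := by
  show (pvResult (pvArr (pvMkDic friends) friends.length gifts)
      (pvGIndex (pvMkDic friends) (pvArr (pvMkDic friends) friends.length gifts)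
        friends.length friends) friends.length).values.foldl (fun answer v => max answer v) 0 = _
  rw [pvResult_pairs]
  set R := ((List.range friends.length).flatMap
      (fun i => (List.range' (i+1) (friends.length-(i+1))).map (fun j => (i, j)))).foldl
    (pvUpd (pvArr (pvMkDic friends) friends.length gifts)
      (pvGIndex (pvMkDic friends) (pvArr (pvMkDic friends) friends.length gifts)
        friends.length friends))
    ((List.range friends.length).foldl (fun r (k : Nat) => r.insert (k : Int) 0) PySem.Dict.empty) with hR
  have hkeys : R.keys = (List.range friends.length).map (fun (k : Nat) => (k : Int)) := by
    rw [hR]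
    exact fold_upd_keys friends gifts hnd hp friends.length _ (P_bounds friends.length) _
      (r0_keys friends.length)
  have hnodup : R.keys.Nodup := by
    rw [hkeys]
    refine List.Nodup.map ?_ List.nodup_range
    intro a b hab
    simp only [] at hab
    exact_mod_cast hab
  rw [PySem.Dict.values_eq_map_keys R hnodup 0, hkeys, List.map_map, List.foldl_map]
  apply PySem.List.foldl_congr_mem
  intro acc k hkm
  rw [List.mem_range] at hkm
  have hval : R.getD ((k : Nat) : Int) 0
      = (((List.range friends.length).countP (fun j => decide (pvBeat friends gifts k j))) : Int) := by
    rw [hR, upd_fold friends gifts hnd hp _ (P_bounds friends.length) _ k,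
      foldl_insert_zero_getD _ _ _ (PySem.Dict.getD_empty _ _),
      countP_pairs friends gifts friends.length k hkm, zero_add]
  simp only [Function.comp_apply]
  rw [hval]

-- ---- B side: direct counts over the token pairs equal the index counts ----
lemma map_getD_range_str (l : List String) :
    (List.range l.length).map (fun k => l.getD k "") = l := by
  apply List.ext_getElem
  · simp
  · intro k h1 h2
    simp only [List.getElem_map, List.getElem_range]
    rw [List.getD_eq_getElem _ _ (by simpa using h2)]

-- a foldl over the list itself is a foldl over its index range (rewrites only the traversal)
lemma foldl_range_str {β : Type} (l : List String) (f : β → String → β) (c : β) :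
    l.foldl f c = (List.range l.length).foldl (fun w j => f w (l.getD j "")) c := by
  conv_lhs => rw [← map_getD_range_str l]
  rw [List.foldl_map]

lemma tok_spec (friends gifts : List String)
    (hp : ∀ g ∈ gifts, (pvSplit g).length = 2 ∧ ∀ t ∈ pvSplit g, t ∈ friends)
    (g : String) (hg : g ∈ gifts) :
    ∃ x y, pvTok g = (x, y) ∧ x ∈ friends ∧ y ∈ friends ∧
      pvKeyP friends g = (pvIdx friends x, pvIdx friends y) := by
  obtain ⟨h2, hmem⟩ := hp g hg
  obtain ⟨x, y, hxy⟩ := len2 _ h2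
  refine ⟨x, y, ?_, hmem x (by rw [hxy]; simp), hmem y (by rw [hxy]; simp), ?_⟩
  · unfold pvTok; rw [hxy]
  · unfold pvKeyP pvKey2; rw [hxy]

lemma count_pair_eq (friends gifts : List String) (hnd : friends.Nodup)
    (hp : ∀ g ∈ gifts, (pvSplit g).length = 2 ∧ ∀ t ∈ pvSplit g, t ∈ friends)
    (k j : Nat) (hk : k < friends.length) (hj : j < friends.length) :
    ((gifts.map pvTok).count (friends[k], friends[j]) : Int) = pvC friends gifts k j := by
  unfold pvC
  congr 1
  rw [List.count_eq_countP, List.count_eq_countP, List.countP_map, List.countP_map]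
  apply List.countP_congr
  intro g hg
  obtain ⟨x, y, htok, hx, hy, hkey⟩ := tok_spec friends gifts hp g hg
  simp only [Function.comp_apply, htok, hkey, beq_iff_eq, Prod.mk.injEq, decide_eq_true_eq,
    decide_eq_decide]
  rw [idx_eq_iff friends hnd x hx k hk, idx_eq_iff friends hnd y hy j hj]

lemma count_giver_eq (friends gifts : List String) (hnd : friends.Nodup)
    (hp : ∀ g ∈ gifts, (pvSplit g).length = 2 ∧ ∀ t ∈ pvSplit g, t ∈ friends)
    (k : Nat) (hk : k < friends.length) :
    (((gifts.map pvTok).map Prod.fst).count friends[k] : Int) = pvCG friends gifts k := by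
  unfold pvCG
  congr 1
  rw [List.count_eq_countP, List.map_map, List.countP_map, List.countP_map]
  apply List.countP_congr
  intro g hg
  obtain ⟨x, y, htok, hx, _, hkey⟩ := tok_spec friends gifts hp g hg
  simp only [Function.comp_apply, htok, hkey, beq_iff_eq, decide_eq_true_eq, decide_eq_decide]
  exact (idx_eq_iff friends hnd x hx k hk).symm

lemma count_receiver_eq (friends gifts : List String) (hnd : friends.Nodup)
    (hp : ∀ g ∈ gifts, (pvSplit g).length = 2 ∧ ∀ t ∈ pvSplit g, t ∈ friends)
    (k : Nat) (hk : k < friends.length) :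
    (((gifts.map pvTok).map Prod.snd).count friends[k] : Int) = pvCR friends gifts k := by
  unfold pvCR
  congr 1
  rw [List.count_eq_countP, List.map_map, List.countP_map, List.countP_map]
  apply List.countP_congr
  intro g hg
  obtain ⟨x, y, htok, _, hy, hkey⟩ := tok_spec friends gifts hp g hg
  simp only [Function.comp_apply, htok, hkey, beq_iff_eq, decide_eq_true_eq, decide_eq_decide]
  exact (idx_eq_iff friends hnd y hy k hk).symm

lemma score_eq (friends gifts : List String) (hnd : friends.Nodup)
    (hp : ∀ g ∈ gifts, (pvSplit g).length = 2 ∧ ∀ t ∈ pvSplit g, t ∈ friends)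
    (k : Nat) (hk : k < friends.length) :
    (((gifts.map pvTok).map Prod.fst).count friends[k] : Int)
      - (((gifts.map pvTok).map Prod.snd).count friends[k] : Int) = pvSc friends gifts k := by
  rw [count_giver_eq friends gifts hnd hp k hk, count_receiver_eq friends gifts hnd hp k hk]
  rfl

lemma foldl_ite_count (l : List Nat) (p : Nat → Prop) [DecidablePred p] (w : Int) :
    l.foldl (fun w j => if p j then w + 1 else w) w = w + (l.countP (fun j => decide (p j)) : Int) := by
  induction l generalizing w with
  | nil => simp
  | cons a t ih =>
    simp only [List.foldl_cons, List.countP_cons, ih]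
    by_cases h : p a
    · simp [h]; push_cast; ring
    · simp [h]

lemma pvWinsB_eq (friends gifts : List String) (hnd : friends.Nodup)
    (hp : ∀ g ∈ gifts, (pvSplit g).length = 2 ∧ ∀ t ∈ pvSplit g, t ∈ friends)
    (k : Nat) (hk : k < friends.length) :
    pvWinsB (gifts.map pvTok) ((gifts.map pvTok).map Prod.fst) ((gifts.map pvTok).map Prod.snd)
        friends friends[k] (pvSc friends gifts k)
      = (((List.range friends.length).countP (fun j => decide (pvBeat friends gifts k j))) : Int) := by
  unfold pvWinsB
  rw [foldl_range_str friends]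
  refine Eq.trans (PySem.List.foldl_congr_mem (List.range friends.length) _
    (fun (w : Int) (j : Nat) => if ¬ j = k ∧ pvBeat friends gifts k j then w + 1 else w) 0 ?_) ?_
  · intro acc j hj
    rw [List.mem_range] at hj
    have hgd : friends.getD j "" = friends[j] := List.getD_eq_getElem _ _ hj
    show _ = if ¬ j = k ∧ pvBeat friends gifts k j then acc + 1 else acc
    rw [hgd]
    by_cases hjk : j = k
    · subst hjk
      rw [if_pos (beq_iff_eq.mpr rfl), if_neg (by tauto)]
    · have hne : friends[j] ≠ friends[k] := by
        intro h; exact hjk (hnd.getElem_inj_iff.mp h)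
      rw [if_neg (by simpa using hne)]
      rw [count_pair_eq friends gifts hnd hp k j hk hj,
          count_pair_eq friends gifts hnd hp j k hj hk,
          score_eq friends gifts hnd hp j hj]
      refine if_congr ?_ rfl rfl
      unfold pvBeat
      constructor
      · intro h; exact ⟨hjk, h⟩
      · intro h; exact h.2
  · rw [foldl_ite_count (List.range friends.length)
      (fun j => ¬ j = k ∧ pvBeat friends gifts k j) 0, zero_add]
    congr 1
    apply List.countP_congr
    intro j _
    simp only [decide_eq_true_eq]
    constructor
    · intro h; exact h.2
    · intro h; exact ⟨fun hjk => pvBeat_irrefl friends gifts k (hjk ▸ h), h⟩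

lemma B_value (friends gifts : List String) (hnd : friends.Nodup)
    (hp : ∀ g ∈ gifts, (pvSplit g).length = 2 ∧ ∀ t ∈ pvSplit g, t ∈ friends) :
    solution_alt friends gifts = (List.range friends.length).foldl
      (fun acc (k : Nat) => max acc
        (((List.range friends.length).countP (fun j => decide (pvBeat friends gifts k j))) : Int)) 0 := by
  show friends.foldl (fun best a =>
      max best (pvWinsB (gifts.map pvTok) ((gifts.map pvTok).map Prod.fst)
        ((gifts.map pvTok).map Prod.snd) friends a
        ((((gifts.map pvTok).map Prod.fst).count a : Int)
          - (((gifts.map pvTok).map Prod.snd).count a : Int)))) 0 = _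
  rw [foldl_range_str friends]
  apply PySem.List.foldl_congr_mem
  intro acc k hkm
  rw [List.mem_range] at hkm
  have hgd : friends.getD k "" = friends[k] := List.getD_eq_getElem _ _ hkm
  rw [hgd, score_eq friends gifts hnd hp k hkm, pvWinsB_eq friends gifts hnd hp k hkm]

-- ===== VERDICT =====
theorem solution_spec : Claim_equal_solution := by
  intro friends gifts _ hpre
  obtain ⟨hnd, hp⟩ := hpre
  unfold Spec_solution
  rw [A_value friends gifts hnd hp, B_value friends gifts hnd hp]
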